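-- pv_equiv track=rewrite | github.com/yesenaer/adventofcode | events/twentythree/day_1.py | replace_written_digits
-- ===== SOURCE A (Python) =====
-- def replace_written_digits(line: str) -> str:
--     digit_map = {'one': '1', 'two': '2', 'three': '3', 'four': '4', 'five': '5', 'six': '6', 'seven': '7', 'eight': '8',
--                  'nine': '9'}
--     result = line
--     indexes = []
--
--     # looping for hits first, because some digits have overlapping values in their text
--     for key in digit_map:
--         if key in result:
--             lowest_index = line.find(key)
--             highest_index = line.rfind(key)
--
--             indexes.append((lowest_index, digit_map[key]))
--             if highest_index > lowest_index:  # only append if not same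
--                 indexes.append((highest_index, digit_map[key]))
--
--     indexes.sort()
--
--     # only replacing first and last digit for now (and only first char) given assignment, could be extended to all
--     if len(indexes) >= 1:
--         result = result[:indexes[0][0]] + indexes[0][1] + result[indexes[0][0]+1:]
--     if len(indexes) > 1:
--         result = result[:indexes[-1][0]] + indexes[-1][1] + result[indexes[-1][0]+1:]
--     return result
-- ===== SOURCE B (Python) =====
-- def replace_written_digits(line: str) -> str:
--     digit_map = {'one': '1', 'two': '2', 'three': '3', 'four': '4', 'five': '5', 'six': '6', 'seven': '7',
--                  'eight': '8', 'nine': '9'}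
--
--     def match_at(i):
--         for word, digit in digit_map.items():
--             if line.startswith(word, i):
--                 return digit
--         return None
--
--     n = len(line)
--     first = None
--     for i in range(n):
--         d = match_at(i)
--         if d is not None:
--             first = (i, d)
--             break
--     if first is None:
--         return line
--
--     last = first
--     for i in reversed(range(n)):
--         d = match_at(i)
--         if d is not None:
--             last = (i, d)
--             break
--
--     out = line[:first[0]] + first[1] + line[first[0] + 1:]
--     if last[0] > first[0]:
--         out = out[:last[0]] + last[1] + out[last[0] + 1:]
--     return out
-- ===== Notes on version B (the rewrite author's own statement) =====
-- stated objective: alternative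
-- what changed: Instead of searching each of the 9 digit-words over the whole string (find/rfind per word), collecting hit pairs and sorting them, B scans string positions directly: a forward scan for the earliest position where any digit-word starts and a backward scan for the latest, then performs the one or two single-character overwrites.
import Mathlib
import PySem

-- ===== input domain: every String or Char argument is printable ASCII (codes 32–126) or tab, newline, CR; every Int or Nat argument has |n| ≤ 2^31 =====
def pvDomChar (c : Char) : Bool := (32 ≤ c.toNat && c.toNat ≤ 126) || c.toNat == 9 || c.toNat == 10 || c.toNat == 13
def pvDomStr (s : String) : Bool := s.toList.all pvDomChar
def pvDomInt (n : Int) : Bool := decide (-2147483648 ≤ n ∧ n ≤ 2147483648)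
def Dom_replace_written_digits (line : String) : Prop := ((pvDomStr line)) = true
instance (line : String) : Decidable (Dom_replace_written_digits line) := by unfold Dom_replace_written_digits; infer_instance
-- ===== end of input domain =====

-- B replaces A's per-word find/rfind + sort of hit pairs by direct forward/backward position
-- scans for the earliest/latest digit-word start (objective: alternative decomposition, same cost).


-- shared primitives: the digit_map (insertion order) and the single-character overwrite
-- line[:i] + c + line[i+1:] (exact for 0 ≤ i < len(line), the only way it is used)
def pvWords : List (List Char × Char) :=
  [(['o','n','e'],'1'), (['t','w','o'],'2'), (['t','h','r','e','e'],'3'),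
   (['f','o','u','r'],'4'), (['f','i','v','e'],'5'), (['s','i','x'],'6'),
   (['s','e','v','e','n'],'7'), (['e','i','g','h','t'],'8'), (['n','i','n','e'],'9')]

def pvSet (cs : List Char) (i : Nat) (c : Char) : List Char :=
  cs.take i ++ c :: cs.drop (i+1)

-- ===== PORT A =====
-- ascending list of all start positions of w in cs; for the nonempty words of pvWords this is
-- exact for Python's str search: find = its head, rfind = its last, 'w in s' = it is nonempty
def pvHits (w cs : List Char) : List Nat :=
  (List.range cs.length).filter (fun i => decide (w <+: cs.drop i))

-- loop body: 'if key in result: append (find, digit); if rfind > find: append (rfind, digit)'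
def pvStep (cs : List Char) (acc : List (Nat × Char)) (wd : List Char × Char) : List (Nat × Char) :=
  match pvHits wd.1 cs with
  | [] => acc
  | lo :: rest =>
    let hi := rest.getLastD lo            -- rfind = last hit
    if lo < hi then acc ++ [(lo, wd.2), (hi, wd.2)] else acc ++ [(lo, wd.2)]

def pvIdxs (cs : List Char) : List (Nat × Char) :=
  pvWords.foldl (pvStep cs) []

-- Python sorts the (int, str) pairs lexicographically; two collected pairs never share the
-- index (at most one digit-word starts at a given position), so sorting by the index is exact.
def pvCoreA (cs : List Char) : List Char :=
  let idxs := PySem.List.sorted (pvIdxs cs) (fun p => p.1) false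
  let r1 := match idxs.head? with
    | none => cs
    | some p => pvSet cs p.1 p.2
  if 1 < idxs.length then
    match idxs.getLast? with
    | none => r1          -- unreachable: length > 1
    | some q => pvSet r1 q.1 q.2
  else r1

def replace_written_digits (line : String) : String := String.ofList (pvCoreA line.toList)

-- ===== PORT B =====
-- match_at(i): first digit-word of the dict starting at position i, else None
def pvMatchAt (cs : List Char) (i : Nat) : Option Char :=
  (pvWords.find? (fun wd => decide (wd.1 <+: cs.drop i))).map (fun wd => wd.2)

-- 'for i in <positions>: if match_at(i) is not None: return (i, d)'
def pvScan (cs : List Char) : List Nat → Option (Nat × Char)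
  | [] => none
  | i :: rest =>
    match pvMatchAt cs i with
    | some d => some (i, d)
    | none => pvScan cs rest

def pvCoreB (cs : List Char) : List Char :=
  match pvScan cs (List.range cs.length) with
  | none => cs
  | some (i, d) =>
    let out := pvSet cs i d
    match pvScan cs (List.range cs.length).reverse with
    | none => out          -- unreachable: a forward hit implies a backward hit
    | some (j, e) => if i < j then pvSet out j e else out

def replace_written_digits_alt (line : String) : String := String.ofList (pvCoreB line.toList)

-- ===== PRECONDITION & SPEC =====
def Spec_replace_written_digits (line : String) (out : String) : Prop := out = replace_written_digits_alt line
instance (line : String) (out : String) : Decidable (Spec_replace_written_digits line out) := by unfold Spec_replace_written_digits; infer_instance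

-- ===== CLAIM (what is proved, stated in full; the proofs are below) =====
def Claim_equal_replace_written_digits : Prop := ∀ (line : String), Dom_replace_written_digits line → Spec_replace_written_digits line (replace_written_digits line)

-- ===== LEMMAS AND PROOFS =====

-- all match positions, ascending
def pvM (cs : List Char) : List Nat :=
  (List.range cs.length).filter (fun i => (pvMatchAt cs i).isSome)

lemma getLastD_mem {α : Type} (l : List α) (a : α) : l.getLastD a ∈ a :: l := by
  rw [List.getLastD_eq_getLast?]
  cases h : l.getLast? with
  | none => simp
  | some g =>
    simp only [Option.getD_some]
    exact List.mem_cons_of_mem _ (List.mem_of_getLast? h)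

lemma pvWords_prefix_eq : ∀ p ∈ pvWords, ∀ q ∈ pvWords, p.1 <+: q.1 → p = q := by decide

lemma pvUniq {t : List Char} {p q : List Char × Char} (hp : p ∈ pvWords) (hq : q ∈ pvWords)
    (h1 : p.1 <+: t) (h2 : q.1 <+: t) : p = q := by
  rcases le_total p.1.length q.1.length with h | h
  · exact pvWords_prefix_eq p hp q hq (List.prefix_of_prefix_length_le h1 h2 h)
  · exact (pvWords_prefix_eq q hq p hp (List.prefix_of_prefix_length_le h2 h1 h)).symm

lemma matchAt_eq_some {cs : List Char} {i : Nat} {wd : List Char × Char}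
    (hmem : wd ∈ pvWords) (hpre : wd.1 <+: cs.drop i) : pvMatchAt cs i = some wd.2 := by
  have hs : (pvWords.find? (fun wd => decide (wd.1 <+: cs.drop i))).isSome := by
    rw [List.find?_isSome]
    exact ⟨wd, hmem, by simpa using hpre⟩
  obtain ⟨q, hq⟩ := Option.isSome_iff_exists.mp hs
  have hqm := List.mem_of_find?_eq_some hq
  have hqp : q.1 <+: cs.drop i := by simpa using List.find?_some hq
  have hqw : q = wd := pvUniq hqm hmem hqp hpre
  simp [pvMatchAt, hq, hqw]

lemma matchAt_isSome_iff {cs : List Char} {i : Nat} :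
    (pvMatchAt cs i).isSome ↔ ∃ wd ∈ pvWords, wd.1 <+: cs.drop i := by
  simp [pvMatchAt, List.find?_isSome]

lemma mem_hits {w cs : List Char} {i : Nat} :
    i ∈ pvHits w cs ↔ i < cs.length ∧ w <+: cs.drop i := by
  simp [pvHits, List.mem_filter, List.mem_range]

lemma hits_pairwise (w cs : List Char) : (pvHits w cs).Pairwise (· < ·) :=
  List.Pairwise.sublist List.filter_sublist List.pairwise_lt_range

lemma mem_pvM {cs : List Char} {i : Nat} :
    i ∈ pvM cs ↔ i < cs.length ∧ (pvMatchAt cs i).isSome := by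
  simp [pvM, List.mem_filter, List.mem_range]

lemma pvM_pairwise (cs : List Char) : (pvM cs).Pairwise (· < ·) :=
  List.Pairwise.sublist List.filter_sublist List.pairwise_lt_range

-- head/getLast of key-monotone lists bound the members
lemma pw_head_le {α : Type} {key : α → Nat} {l : List α} {m a : α}
    (hp : l.Pairwise (fun a b => key a ≤ key b)) (hh : l.head? = some m) (ha : a ∈ l) :
    key m ≤ key a := by
  cases l with
  | nil => simp at ha
  | cons x t =>
    simp at hh; subst hh
    rcases List.mem_cons.mp ha with rfl | h
    · exact le_refl _
    · exact (List.pairwise_cons.mp hp).1 a h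

lemma pw_le_getLast {α : Type} {key : α → Nat} {l : List α} {g a : α}
    (hp : l.Pairwise (fun a b => key a ≤ key b)) (hg : l.getLast? = some g) (ha : a ∈ l) :
    key a ≤ key g := by
  induction l with
  | nil => simp at ha
  | cons x t ih =>
    cases t with
    | nil =>
      simp at hg ha; subst hg; subst ha; exact le_refl _
    | cons y s =>
      rw [List.getLast?_cons_cons] at hg
      rcases List.mem_cons.mp ha with rfl | h
      · exact (List.pairwise_cons.mp hp).1 g (List.mem_of_getLast? (l := y :: s) hg)
      · exact ih (List.pairwise_cons.mp hp).2 hg h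

-- soundness of the collected pairs
lemma foldl_step_sound {cs : List Char} {p : Nat × Char} :
    ∀ (ws : List (List Char × Char)) (acc : List (Nat × Char)),
      p ∈ ws.foldl (pvStep cs) acc →
      p ∈ acc ∨ ∃ wd ∈ ws, p.2 = wd.2 ∧ p.1 ∈ pvHits wd.1 cs := by
  intro ws
  induction ws with
  | nil => intro acc h; exact Or.inl (by simpa using h)
  | cons w t ih =>
    intro acc h
    rcases ih _ h with h' | ⟨wd, hw, h2, h1⟩
    · unfold pvStep at h'
      rcases hh : pvHits w.1 cs with _ | ⟨lo, rest⟩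
      · rw [hh] at h'; exact Or.inl h'
      · rw [hh] at h'
        simp only [] at h'
        have hmem : p ∈ acc ∨ p = (lo, w.2) ∨ p = (rest.getLastD lo, w.2) := by
          split at h' <;> rcases List.mem_append.mp h' with h'' | h''
          · exact Or.inl h''
          · simp [List.getLastD_eq_getLast?] ; simp at h''; tauto
          · exact Or.inl h''
          · simp [List.getLastD_eq_getLast?] ; simp at h''; tauto
        rcases hmem with h'' | rfl | rfl
        · exact Or.inl h''
        · refine Or.inr ⟨w, List.mem_cons_self, rfl, ?_⟩
          rw [hh]; exact List.mem_cons_self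
        · refine Or.inr ⟨w, List.mem_cons_self, rfl, ?_⟩
          rw [hh]; exact getLastD_mem rest lo
    · exact Or.inr ⟨wd, List.mem_cons_of_mem _ hw, h2, h1⟩

lemma foldl_step_mono {cs : List Char} {p : Nat × Char} :
    ∀ (ws : List (List Char × Char)) (acc : List (Nat × Char)), p ∈ acc →
      p ∈ ws.foldl (pvStep cs) acc := by
  intro ws
  induction ws with
  | nil => intro acc h; simpa using h
  | cons w t ih =>
    intro acc h
    apply ih
    unfold pvStep
    cases pvHits w.1 cs with
    | nil => exact h
    | cons lo rest =>
      simp only []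
      split <;> exact List.mem_append_left _ h

lemma foldl_step_complete {cs : List Char} {wd : List Char × Char} {lo : Nat} {rest : List Nat} :
    ∀ (ws : List (List Char × Char)) (acc : List (Nat × Char)), wd ∈ ws →
      pvHits wd.1 cs = lo :: rest →
      (lo, wd.2) ∈ ws.foldl (pvStep cs) acc ∧ (rest.getLastD lo, wd.2) ∈ ws.foldl (pvStep cs) acc := by
  intro ws
  induction ws with
  | nil => intro acc h; simp at h
  | cons w t ih =>
    intro acc hw hh
    rcases List.mem_cons.mp hw with rfl | hw'
    · have hstep : (lo, wd.2) ∈ pvStep cs acc wd ∧ (rest.getLastD lo, wd.2) ∈ pvStep cs acc wd := by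
        unfold pvStep
        rw [hh]
        simp only []
        split
        · constructor <;> simp [List.getLastD_eq_getLast?]
        · rename_i hlt
          have hmem := getLastD_mem rest lo
          have heq : rest.getLastD lo = lo := by
            rcases List.mem_cons.mp hmem with h' | h'
            · exact h'
            · have hpw := hits_pairwise wd.1 cs
              rw [hh] at hpw
              exact absurd ((List.pairwise_cons.mp hpw).1 _ h') hlt
          rw [heq]
          constructor <;> simp
      exact ⟨foldl_step_mono t _ hstep.1, foldl_step_mono t _ hstep.2⟩
    · exact ih _ hw' hh

lemma idxs_sound {cs : List Char} {p : Nat × Char} (h : p ∈ pvIdxs cs) :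
    p.1 ∈ pvM cs ∧ pvMatchAt cs p.1 = some p.2 := by
  rcases foldl_step_sound pvWords [] h with h' | ⟨wd, hw, h2, h1⟩
  · simp at h'
  · obtain ⟨hlen, hpre⟩ := mem_hits.mp h1
    have hm := matchAt_eq_some hw hpre
    refine ⟨mem_pvM.mpr ⟨hlen, by simp [hm]⟩, by rw [hm, h2]⟩

-- the least and greatest global match positions occur among the collected pairs
lemma idxs_has_head {cs : List Char} {i : Nat} (hi : (pvM cs).head? = some i) :
    ∃ d, pvMatchAt cs i = some d ∧ (i, d) ∈ pvIdxs cs := by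
  have him : i ∈ pvM cs := by
    obtain ⟨ys, hys⟩ := List.head?_eq_some_iff.mp hi
    rw [hys]; exact List.mem_cons_self
  obtain ⟨hlen, hsome⟩ := mem_pvM.mp him
  obtain ⟨wd, hw, hpre⟩ := matchAt_isSome_iff.mp hsome
  have hih : i ∈ pvHits wd.1 cs := mem_hits.mpr ⟨hlen, hpre⟩
  rcases hh : pvHits wd.1 cs with _ | ⟨lo, rest⟩
  · rw [hh] at hih; simp at hih
  · have hloM : lo ∈ pvM cs := by
      have hlomem : lo ∈ pvHits wd.1 cs := by rw [hh]; exact List.mem_cons_self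
      obtain ⟨hl1, hl2⟩ := mem_hits.mp hlomem
      exact mem_pvM.mpr ⟨hl1, matchAt_isSome_iff.mpr ⟨wd, hw, hl2⟩⟩
    have h1 : i ≤ lo := pw_head_le (key := id) ((pvM_pairwise cs).imp le_of_lt) hi hloM
    have h2 : lo ≤ i := by
      rw [hh] at hih
      exact pw_head_le (key := id) ((hits_pairwise wd.1 cs).imp le_of_lt |>.sublist
        (by rw [hh])) rfl hih
    have heq : lo = i := le_antisymm h2 h1
    refine ⟨wd.2, matchAt_eq_some hw hpre, ?_⟩
    have := (foldl_step_complete pvWords [] hw hh).1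
    rwa [heq] at this

lemma idxs_has_last {cs : List Char} {j : Nat} (hj : (pvM cs).getLast? = some j) :
    ∃ d, pvMatchAt cs j = some d ∧ (j, d) ∈ pvIdxs cs := by
  have hjm : j ∈ pvM cs := List.mem_of_getLast? hj
  obtain ⟨hlen, hsome⟩ := mem_pvM.mp hjm
  obtain ⟨wd, hw, hpre⟩ := matchAt_isSome_iff.mp hsome
  have hjh : j ∈ pvHits wd.1 cs := mem_hits.mpr ⟨hlen, hpre⟩
  rcases hh : pvHits wd.1 cs with _ | ⟨lo, rest⟩
  · rw [hh] at hjh; simp at hjh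
  · have hhiM : rest.getLastD lo ∈ pvM cs := by
      have hhimem : rest.getLastD lo ∈ pvHits wd.1 cs := by
        rw [hh]; exact getLastD_mem rest lo
      obtain ⟨hl1, hl2⟩ := mem_hits.mp hhimem
      exact mem_pvM.mpr ⟨hl1, matchAt_isSome_iff.mpr ⟨wd, hw, hl2⟩⟩
    have hglast : (pvHits wd.1 cs).getLast? = some (rest.getLastD lo) := by
      rw [hh, List.getLast?_cons, List.getLastD_eq_getLast?]
    have h1 : j ≤ rest.getLastD lo := by
      rw [hh] at hglast hjh
      exact pw_le_getLast (key := id) (((hits_pairwise wd.1 cs).imp le_of_lt).sublist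
        (by rw [hh])) hglast hjh
    have h2 : rest.getLastD lo ≤ j :=
      pw_le_getLast (key := id) ((pvM_pairwise cs).imp le_of_lt) hj hhiM
    have heq : rest.getLastD lo = j := le_antisymm h2 h1
    refine ⟨wd.2, matchAt_eq_some hw hpre, ?_⟩
    have := (foldl_step_complete pvWords [] hw hh).2
    rwa [heq] at this

lemma scan_eq {cs : List Char} : ∀ l : List Nat,
    pvScan cs l = (l.filter (fun i => (pvMatchAt cs i).isSome)).head?.bind
      (fun i => (pvMatchAt cs i).map (fun d => (i, d))) := by
  intro l
  induction l with
  | nil => simp [pvScan]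
  | cons i rest ih =>
    rcases h : pvMatchAt cs i with _ | d
    · simp [pvScan, h, ih]
    · simp [pvScan, h]

lemma pvSet_idem {cs : List Char} {i : Nat} {c : Char} (h : i < cs.length) :
    pvSet (pvSet cs i c) i c = pvSet cs i c := by
  have hl : (cs.take i).length = i := by simp; omega
  unfold pvSet
  rw [List.take_append, List.drop_append, hl]
  simp [List.take_take, List.drop_eq_nil_of_le, hl]

-- pvM is exactly the filter pvScan's characterisation produces
lemma pvM_def (cs : List Char) :
    (List.range cs.length).filter (fun i => (pvMatchAt cs i).isSome) = pvM cs := rfl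

lemma core_eq (cs : List Char) : pvCoreA cs = pvCoreB cs := by
  simp only [pvCoreA, pvCoreB]
  rw [scan_eq, scan_eq, List.filter_reverse, List.head?_reverse, pvM_def]
  rcases hM : (pvM cs).head? with _ | i
  · -- no digit-word occurs: both sides return cs unchanged
    have hMnil : pvM cs = [] := List.head?_eq_none_iff.mp hM
    have hidx : pvIdxs cs = [] := by
      rw [List.eq_nil_iff_forall_not_mem]
      intro p hp
      have := (idxs_sound hp).1
      rw [hMnil] at this
      simp at this
    have hS : PySem.List.sorted (pvIdxs cs) (fun p => p.1) false = [] := by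
      rw [PySem.List.sorted_eq_nil_iff]; exact hidx
    rw [hS]
    simp
  · obtain ⟨di, hdi, hdimem⟩ := idxs_has_head hM
    have hMne : pvM cs ≠ [] := by
      intro h; rw [h] at hM; simp at hM
    obtain ⟨j, hj⟩ : ∃ j, (pvM cs).getLast? = some j := by
      rcases hMl : (pvM cs).getLast? with _ | j
      · exact absurd (List.getLast?_eq_none_iff.mp hMl) hMne
      · exact ⟨j, rfl⟩
    obtain ⟨dj, hdj, hdjmem⟩ := idxs_has_last hj
    have hiM : i ∈ pvM cs := by
      obtain ⟨ys, hys⟩ := List.head?_eq_some_iff.mp hM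
      rw [hys]; exact List.mem_cons_self
    have hjM : j ∈ pvM cs := List.mem_of_getLast? hj
    have hij : i ≤ j :=
      pw_head_le (key := id) ((pvM_pairwise cs).imp le_of_lt) hM hjM
    have hilen : i < cs.length := (mem_pvM.mp hiM).1
    -- the sorted pair list: head = (i, di), getLast = (j, dj)
    set S := PySem.List.sorted (pvIdxs cs) (fun p => p.1) false with hSdef
    have hperm : S.Perm (pvIdxs cs) := PySem.List.sorted_perm _ _ _
    have hSpw : S.Pairwise (fun a b => a.1 ≤ b.1) := PySem.List.sorted_pairwise _ _
    have hdiS : (i, di) ∈ S := hperm.mem_iff.mpr hdimem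
    have hdjS : (j, dj) ∈ S := hperm.mem_iff.mpr hdjmem
    rcases hScase : S with _ | ⟨s0, S'⟩
    · rw [hScase] at hdiS; simp at hdiS
    · have hs0 : s0 = (i, di) := by
        have hs0mem : s0 ∈ pvIdxs cs := hperm.mem_iff.mp (by rw [hScase]; exact List.mem_cons_self)
        obtain ⟨hs0M, hs0match⟩ := idxs_sound hs0mem
        have h1 : s0.1 ≤ i := PySem.List.key_head_sorted_le _ _ (hSdef ▸ hScase) _ hdimem
        have h2 : i ≤ s0.1 := pw_head_le (key := id) ((pvM_pairwise cs).imp le_of_lt) hM hs0M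
        have hfst : s0.1 = i := le_antisymm h1 h2
        have : pvMatchAt cs i = some s0.2 := by rw [← hfst]; exact hs0match
        have hsnd : s0.2 = di := by
          rw [hdi] at this; exact (Option.some_injective _ this).symm
        exact Prod.ext hfst hsnd
      obtain ⟨q, hq⟩ : ∃ q, S.getLast? = some q := by
        rw [hScase]; exact ⟨_, List.getLast?_cons⟩
      have hqlast : q = (j, dj) := by
        have hqmem : q ∈ pvIdxs cs := hperm.mem_iff.mp (List.mem_of_getLast? hq)
        obtain ⟨hqM, hqmatch⟩ := idxs_sound hqmem
        have h1 : j ≤ q.1 := pw_le_getLast (key := fun p => p.1) hSpw hq hdjS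
        have h2 : q.1 ≤ j := pw_le_getLast (key := id) ((pvM_pairwise cs).imp le_of_lt) hj hqM
        have hfst : q.1 = j := le_antisymm h2 h1
        have : pvMatchAt cs j = some q.2 := by rw [← hfst]; exact hqmatch
        have hsnd : q.2 = dj := by
          rw [hdj] at this; exact (Option.some_injective _ this).symm
        exact Prod.ext hfst hsnd
      subst hqlast; subst hs0
      rw [hj]
      simp only [Option.bind_some]
      rw [hdi, hdj]
      simp only [Option.map_some, List.head?_cons]
      rcases hS' : S' with _ | ⟨s1, S''⟩
      · -- a single collected pair: first and last position coincide
        rw [hScase, hS'] at hq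
        simp at hq
        obtain ⟨hji, hdd⟩ := hq
        subst hji; subst hdd
        simp
      · -- at least two pairs: replace at the head, then at the last position
        rw [hScase, hS'] at hq
        have hlen : 1 < ((i, di) :: s1 :: S'').length := by simp
        rw [if_pos hlen, hq]
        rcases lt_or_ge j i with hlt | hge
        · omega
        · rcases eq_or_lt_of_le hge with hji | hlt
          · subst hji
            have hdd : dj = di := by
              rw [hdi] at hdj; exact (Option.some_injective _ hdj).symm
            subst hdd
            simp [pvSet_idem hilen]
          · simp [hlt]

-- ===== VERDICT (by name: the statement is the Claim_ definition above) =====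
theorem replace_written_digits_spec : Claim_equal_replace_written_digits := by
  intro line _
  unfold Spec_replace_written_digits replace_written_digits replace_written_digits_alt
  rw [core_eq]
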